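-- pv_equiv track=rewrite | github.com/inventra/pixelle-content-studio | pixelle_video/services/content_studio/storyboard_generator.py | _bucket_sentences
-- ===== SOURCE A (Python) =====
-- from typing import Awaitable, Callable, List, Optional
--
-- def _bucket_sentences(sentences: List[str], buckets: int) -> List[str]:
--     """Distribute ``sentences`` across ``buckets`` chunks as evenly as possible.
--
--     Returns at most ``buckets`` non-empty chunks. Caller is responsible
--     for padding when the source has fewer sentences than buckets.
--     """
--     if buckets <= 0:
--         return []
--     n = len(sentences)
--     if n == 0:
--         return []
--     if n <= buckets:
--         return list(sentences)
--
--     # Compute boundaries by integer division so chunks vary by at most 1.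
--     boundaries = [(i * n) // buckets for i in range(buckets + 1)]
--     chunks: List[str] = []
--     for start, end in zip(boundaries, boundaries[1:]):
--         if start == end:
--             continue
--         chunks.append(" ".join(sentences[start:end]))
--     return chunks
-- ===== SOURCE B (Python) =====
-- def _bucket_sentences(sentences, buckets):
--     """Distribute sentences across buckets evenly: remainder-accumulator
--     (Bresenham) walk instead of precomputed boundary list."""
--     if buckets <= 0:
--         return []
--     n = len(sentences)
--     if n == 0:
--         return []
--     if n <= buckets:
--         return list(sentences)
--     base, r = divmod(n, buckets)
--     chunks = []
--     start = 0
--     acc = 0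
--     for _ in range(buckets):
--         acc += r
--         if acc >= buckets:
--             size = base + 1
--             acc -= buckets
--         else:
--             size = base
--         chunks.append(" ".join(sentences[start:start + size]))
--         start += size
--     return chunks
-- ===== Notes on version B (the rewrite author's own statement) =====
-- stated objective: alternative
-- what changed: Replaces A's precomputed boundary list ((i*n)//buckets for all i) plus zip-over-adjacent-pairs with a single remainder-accumulator (Bresenham) walk that threads a running start index and error term acc, computing each chunk size on the fly via divmod.
import Mathlib
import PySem

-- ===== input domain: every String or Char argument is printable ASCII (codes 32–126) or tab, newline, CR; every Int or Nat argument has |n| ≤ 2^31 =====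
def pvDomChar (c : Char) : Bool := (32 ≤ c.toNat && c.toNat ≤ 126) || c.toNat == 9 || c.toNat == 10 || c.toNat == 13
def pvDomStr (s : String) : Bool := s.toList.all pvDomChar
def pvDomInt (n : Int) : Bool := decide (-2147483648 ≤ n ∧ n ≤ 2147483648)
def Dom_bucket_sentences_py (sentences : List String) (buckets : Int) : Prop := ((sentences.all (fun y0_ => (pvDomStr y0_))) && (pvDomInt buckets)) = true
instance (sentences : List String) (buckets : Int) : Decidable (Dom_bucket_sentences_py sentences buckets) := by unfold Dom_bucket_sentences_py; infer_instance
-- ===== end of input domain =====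

-- B replaces A's precomputed boundary list + zip with a single remainder-accumulator
-- (Bresenham) walk over the buckets; objective: alternative decomposition, same cost.

-- ===== PORT A =====
def bucket_sentences_py (sentences : List String) (buckets : Int) : List String :=
  if buckets ≤ 0 then []
  else
    let n : Int := sentences.length
    if n = 0 then []
    else if n ≤ buckets then sentences
    else
      let boundaries : List Int :=
        (PySem.List.pyRange 0 (buckets + 1) 1).map (fun i => PySem.Int.floordiv (i * n) buckets)
      (boundaries.zip (PySem.List.slice boundaries (some 1) none)).foldl
        (fun chunks p =>
          if p.1 = p.2 then chunks
          else chunks ++ [PySem.Str.join " " (PySem.List.slice sentences (some p.1) (some p.2))]) []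

-- ===== PORT B =====
def bsAltLoop (sentences : List String) (buckets base r : Int) :
    Nat → Int → Int → List String → List String
  | 0, _start, _acc, chunks => chunks
  | k+1, start, acc, chunks =>
    if buckets ≤ acc + r then
      bsAltLoop sentences buckets base r k (start + (base + 1)) (acc + r - buckets)
        (chunks ++ [PySem.Str.join " " (PySem.List.slice sentences (some start) (some (start + (base + 1))))])
    else
      bsAltLoop sentences buckets base r k (start + base) (acc + r)
        (chunks ++ [PySem.Str.join " " (PySem.List.slice sentences (some start) (some (start + base)))])

def bucket_sentences_py_alt (sentences : List String) (buckets : Int) : List String :=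
  if buckets ≤ 0 then []
  else
    let n : Int := sentences.length
    if n = 0 then []
    else if n ≤ buckets then sentences
    else
      let base := PySem.Int.floordiv n buckets
      let r := PySem.Int.mod n buckets
      bsAltLoop sentences buckets base r buckets.toNat 0 0 []

-- ===== PRECONDITION & SPEC =====
def Spec_bucket_sentences_py (sentences : List String) (buckets : Int) (out : List String) : Prop := out = bucket_sentences_py_alt sentences buckets
instance (sentences : List String) (buckets : Int) (out : List String) : Decidable (Spec_bucket_sentences_py sentences buckets out) := by unfold Spec_bucket_sentences_py; infer_instance

-- ===== CLAIM (what is proved, stated in full; the proofs are below) =====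
def Claim_equal_bucket_sentences_py : Prop := ∀ (sentences : List String) (buckets : Int), Dom_bucket_sentences_py sentences buckets → Spec_bucket_sentences_py sentences buckets (bucket_sentences_py sentences buckets)

-- ===== LEMMAS AND PROOFS =====

-- the common chunk list both loops produce
def pvChunks (s : List String) (N B : Nat) : List Nat → List String :=
  fun l => l.map (fun i => PySem.Str.join " " ((s.drop (i * N / B)).take ((i + 1) * N / B - i * N / B)))

theorem pv_mod_eq (N B i : Nat) : i * N % B = i * (N % B) % B := by
  conv_lhs => rw [Nat.mul_mod]
  conv_rhs => rw [Nat.mul_mod, Nat.mod_mod_of_dvd _ dvd_rfl]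

theorem pv_size (N B i : Nat) (hB : 0 < B) :
    (i + 1) * N / B = i * N / B + N / B + (if B ≤ i * (N % B) % B + N % B then 1 else 0) := by
  have h : (i + 1) * N = i * N + N := by ring
  rw [h, Nat.add_div hB, ← pv_mod_eq]

theorem pv_acc_succ (N B i : Nat) (hB : 0 < B) :
    (i + 1) * (N % B) % B =
      (if B ≤ i * (N % B) % B + N % B then i * (N % B) % B + N % B - B
       else i * (N % B) % B + N % B) := by
  have h : (i + 1) * (N % B) = i * (N % B) + N % B := by ring
  rw [h, ← Nat.mod_add_mod]
  have h1 : N % B < B := Nat.mod_lt _ hB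
  have h2 : i * (N % B) % B < B := Nat.mod_lt _ hB
  split_ifs with hc
  · rw [Nat.mod_eq_sub_mod hc, Nat.mod_eq_of_lt (by omega)]
  · exact Nat.mod_eq_of_lt (by omega)

theorem pv_strict (N B i : Nat) (hB : 0 < B) (hN : B < N) :
    i * N / B < (i + 1) * N / B := by
  have h : i * N + B ≤ (i + 1) * N := by nlinarith
  calc i * N / B < (i * N + B) / B := by rw [Nat.add_div_right _ hB]; omega
    _ ≤ (i + 1) * N / B := Nat.div_le_div_right h

theorem pv_alt_inv (s : List String) (N B : Nat) (hB : 0 < B) :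
    ∀ (k i : Nat) (chunks : List String), i + k = B →
      bsAltLoop s (B : Int) ((N / B : Nat) : Int) ((N % B : Nat) : Int) k
        ((i * N / B : Nat) : Int) ((i * (N % B) % B : Nat) : Int) chunks
      = chunks ++ pvChunks s N B (List.range' i k) := by
  intro k
  induction k with
  | zero => intro i chunks _; simp [bsAltLoop, pvChunks]
  | succ k ih =>
    intro i chunks hik
    have hmod1 : i * (N % B) % B < B := Nat.mod_lt _ hB
    have hmod2 : N % B < B := Nat.mod_lt _ hB
    have hacc := pv_acc_succ N B i hB
    have hsz := pv_size N B i hB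
    rw [bsAltLoop]
    split_ifs with hc
    · have hcN : B ≤ i * (N % B) % B + N % B := by exact_mod_cast hc
      rw [if_pos hcN] at hacc hsz
      have e1 : ((i * N / B : Nat) : Int) + (((N / B : Nat) : Int) + 1)
          = (((i + 1) * N / B : Nat) : Int) := by rw [hsz]; push_cast; ring
      have e2 : ((i * (N % B) % B : Nat) : Int) + ((N % B : Nat) : Int) - (B : Int)
          = (((i + 1) * (N % B) % B : Nat) : Int) := by rw [hacc, Nat.cast_sub hcN]; push_cast; ring
      have e3 : PySem.List.slice s (some ((i * N / B : Nat) : Int))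
            (some (((i * N / B : Nat) : Int) + (((N / B : Nat) : Int) + 1)))
          = (s.drop (i * N / B)).take ((i + 1) * N / B - i * N / B) := by
        have h4 : (((N / B : Nat) : Int) + 1) = ((N / B + 1 : Nat) : Int) := by push_cast; ring
        rw [h4, PySem.List.slice_natCast_add, hsz]
        congr 1
        clear hc e1 e2 h4 hacc hsz hcN
        generalize i * N / B = a
        generalize N / B = c
        omega
      rw [e3, e1, e2, ih (i + 1) _ (by omega), List.range'_succ]
      simp [pvChunks]
    · have hcN : ¬ B ≤ i * (N % B) % B + N % B := by
        intro h; exact hc (by exact_mod_cast h)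
      rw [if_neg hcN] at hacc hsz
      have e1 : ((i * N / B : Nat) : Int) + ((N / B : Nat) : Int)
          = (((i + 1) * N / B : Nat) : Int) := by rw [hsz]; push_cast; ring
      have e2 : ((i * (N % B) % B : Nat) : Int) + ((N % B : Nat) : Int)
          = (((i + 1) * (N % B) % B : Nat) : Int) := by rw [hacc]; push_cast; ring
      have e3 : PySem.List.slice s (some ((i * N / B : Nat) : Int))
            (some (((i * N / B : Nat) : Int) + ((N / B : Nat) : Int)))
          = (s.drop (i * N / B)).take ((i + 1) * N / B - i * N / B) := by
        rw [PySem.List.slice_natCast_add, hsz]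
        congr 1
        clear hc e1 e2 hacc hsz hcN
        generalize i * N / B = a
        generalize N / B = c
        omega
      rw [e3, e1, e2, ih (i + 1) _ (by omega), List.range'_succ]
      simp [pvChunks]

theorem pv_zip_tail {α : Type} (g : Nat → α) (B : Nat) :
    (((List.range (B + 1)).map g).zip (((List.range (B + 1)).map g).tail))
      = (List.range B).map (fun i => (g i, g (i + 1))) := by
  apply List.ext_getElem
  · simp
  · intro i h1 h2
    simp [List.getElem_zip, List.getElem_tail]

-- ===== VERDICT (by name: the statement is the Claim_ definition above) =====
theorem pv_main_eq (s : List String) (b : Int) (hb0 : 0 < b)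
    (hlt : b < (s.length : Int)) :
    bucket_sentences_py s b = bucket_sentences_py_alt s b := by
  have hb : ¬ b ≤ 0 := by omega
  have hn0 : ¬ (s.length : Int) = 0 := by omega
  have hle : ¬ (s.length : Int) ≤ b := by omega
  obtain ⟨B, rfl⟩ : ∃ B : Nat, b = (B : Int) := ⟨b.toNat, (Int.toNat_of_nonneg (by omega)).symm⟩
  have hB : 0 < B := by exact_mod_cast hb0
  have hBN : B < s.length := by exact_mod_cast hlt
  unfold bucket_sentences_py bucket_sentences_py_alt
  simp only [if_neg hb, if_neg hn0, if_neg hle]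
  -- B side
  have halt : bsAltLoop s (B : Int) (PySem.Int.floordiv (s.length : Int) (B : Int))
      (PySem.Int.mod (s.length : Int) (B : Int)) ((B : Int)).toNat 0 0 []
      = pvChunks s s.length B (List.range' 0 B) := by
    have h := pv_alt_inv s s.length B hB B 0 [] (by omega)
    simpa using h
  rw [halt]
  -- A side
  rw [PySem.List.slice_from_one, PySem.List.pyRange_one]
  have hcnt : (((B : Int) + 1) - 0).toNat = B + 1 := by omega
  rw [hcnt, List.map_map]
  have hg : ((fun i => PySem.Int.floordiv (i * (s.length : Int)) (B : Int)) ∘ fun k : Nat => (0 : Int) + (k : Int))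
      = fun k : Nat => ((k * s.length / B : Nat) : Int) := by
    funext k
    simp only [Function.comp, zero_add]
    rw [show ((k : Int) * (s.length : Int)) = ((k * s.length : Nat) : Int) by push_cast; ring,
      PySem.Int.floordiv_natCast]
  rw [hg, pv_zip_tail]
  have hfun : (fun (chunks : List String) (p : Int × Int) =>
        if p.1 = p.2 then chunks
        else chunks ++ [PySem.Str.join " " (PySem.List.slice s (some p.1) (some p.2))])
      = fun chunks p => if p.1 ≠ p.2
          then chunks ++ [PySem.Str.join " " (PySem.List.slice s (some p.1) (some p.2))]
          else chunks := by
    funext c p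
    by_cases h : p.1 = p.2 <;> simp [h]
  rw [hfun, PySem.List.foldl_append_ite, List.filter_map, List.filter_eq_self.mpr, List.map_map]
  · rw [List.range_eq_range']
    unfold pvChunks
    simp only [List.nil_append]
    apply List.map_congr_left
    intro i _
    simp only [Function.comp]
    rw [PySem.List.slice_natCast]
  · intro i _
    have := pv_strict s.length B i hB hBN
    simp only [Function.comp]
    simp only [decide_eq_true_eq, ne_eq, Nat.cast_inj]
    omega

theorem bucket_sentences_py_spec : Claim_equal_bucket_sentences_py := by
  intro s b _hdom
  unfold Spec_bucket_sentences_py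
  by_cases hb : b ≤ 0
  · unfold bucket_sentences_py bucket_sentences_py_alt
    simp [hb]
  · by_cases hn0 : (s.length : Int) = 0
    · unfold bucket_sentences_py bucket_sentences_py_alt
      simp [hb, hn0]
    · by_cases hle : (s.length : Int) ≤ b
      · unfold bucket_sentences_py bucket_sentences_py_alt
        simp [hb, hle]
      · exact pv_main_eq s b (by omega) (by omega)
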